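-- pv_equiv track=rewrite | github.com/FunctionalEpigeneticsLab/GiRAFR | girafr/utils.py | compare_two_sequences
-- ===== SOURCE A (Python) =====
-- def compare_two_sequences(seq1, seq2):
-- 	# mismatch = utils.compare_two_sequences(ref[pos_r: (pos_r+n)], seq[pos_q: (pos_q+n)])
-- 	# only compare two sequences which have same length
-- 	# seq1= 'ATGCatcc' # ref
-- 	# seq2= 'AAGCaTgc' # query
-- 	# return 1A4C
-- 	assert len(seq1) == len(seq2)
-- 	seq1 = seq1.upper() # reference sequence normally
-- 	seq2 = seq2.upper()
-- 	pos = 0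
-- 	out = ''
-- 	for i in range(0,len(seq1)):
-- 		if seq1[i] ==  seq2[i]:
-- 			pos += 1
-- 		elif seq1[i] == 'N': # When N in reference sequence, report as match no matter for any seq2[i].
-- 			pos += 1
-- 		else:
-- 			#if pos == 0:
-- 			#	out += str(seq2[i])
-- 			#else:
-- 			#	out += str(pos)+str(seq2[i])
-- 			out += str(pos) + str(seq2[i])
-- 			pos = 0 # initalise counting
-- 	out += str(pos) + 'M' # maybe should use a new symple to represent match #TODO
-- 	return out
-- ===== SOURCE B (Python) =====
-- def compare_two_sequences(seq1, seq2):
--     assert len(seq1) == len(seq2)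
--     s1 = seq1.upper()
--     s2 = seq2.upper()
--     mismatches = [(i, c2) for i, (c1, c2) in enumerate(zip(s1, s2))
--                   if c1 != c2 and c1 != 'N']
--     parts = []
--     prev = -1
--     for i, c in mismatches:
--         parts.append(str(i - prev - 1) + c)
--         prev = i
--     parts.append(str(len(s1) - prev - 1) + 'M')
--     return ''.join(parts)
-- ===== Notes on version B (the rewrite author's own statement) =====
-- stated objective: alternative
-- what changed: B first collects the list of mismatch positions in one comprehension over enumerate(zip(...)), then rebuilds the encoded string from index gaps between consecutive mismatches and joins the segments, instead of A's single loop that carries a running match counter and appends to a string.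
import Mathlib
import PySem

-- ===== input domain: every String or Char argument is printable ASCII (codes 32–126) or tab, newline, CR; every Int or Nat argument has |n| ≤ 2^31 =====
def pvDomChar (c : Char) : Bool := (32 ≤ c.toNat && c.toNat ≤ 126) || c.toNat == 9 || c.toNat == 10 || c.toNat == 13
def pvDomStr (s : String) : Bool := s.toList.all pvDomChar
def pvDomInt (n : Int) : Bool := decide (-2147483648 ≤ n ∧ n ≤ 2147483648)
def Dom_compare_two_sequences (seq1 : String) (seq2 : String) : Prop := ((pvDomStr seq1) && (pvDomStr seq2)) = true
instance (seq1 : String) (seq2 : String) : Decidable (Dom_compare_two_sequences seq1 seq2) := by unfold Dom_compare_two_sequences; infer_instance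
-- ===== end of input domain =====

-- B re-encodes mismatches by first collecting mismatch positions and then joining gap-sized segments; same result, different decomposition.

-- ===== PORT A =====
-- literal port of A: uppercase both, loop i over range(0, len(seq1)) carrying (pos, out)
def compare_two_sequences (seq1 : String) (seq2 : String) : String :=
  let l1 := PySem.Chars.upper seq1.toList
  let l2 := PySem.Chars.upper seq2.toList
  let r := (PySem.List.pyRange 0 (l1.length : Int) 1).foldl
    (fun (st : Int × List Char) i =>
      let c1 := PySem.List.pyGetD l1 i ' '
      let c2 := PySem.List.pyGetD l2 i ' '
      if c1 = c2 then (st.1 + 1, st.2)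
      else if c1 = 'N' then (st.1 + 1, st.2)
      else (0, st.2 ++ PySem.Int.toChars st.1 ++ [c2]))
    (0, [])
  String.mk (r.2 ++ PySem.Int.toChars r.1 ++ ['M'])

-- ===== PORT B =====
-- literal port of B: mismatch list via enumerate(zip(s1, s2)), then gap arithmetic, then join
def compare_two_sequences_alt (seq1 : String) (seq2 : String) : String :=
  let l1 := PySem.Chars.upper seq1.toList
  let l2 := PySem.Chars.upper seq2.toList
  let mismatches := (PySem.List.enumerate (l1.zip l2) 0).filterMap
    (fun p => if p.2.1 ≠ p.2.2 ∧ p.2.1 ≠ 'N' then some (p.1, p.2.2) else none)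
  let r := mismatches.foldl
    (fun (st : Int × List (List Char)) ic =>
      (ic.1, st.2 ++ [PySem.Int.toChars (ic.1 - st.1 - 1) ++ [ic.2]]))
    (-1, [])
  String.mk ((r.2 ++ [PySem.Int.toChars ((l1.length : Int) - r.1 - 1) ++ ['M']]).flatten)

-- ===== PRECONDITION & SPEC =====
-- A asserts len(seq1) == len(seq2); Pre_ excludes exactly the inputs where that assert raises.
def Pre_compare_two_sequences (seq1 : String) (seq2 : String) : Prop :=
  seq1.toList.length = seq2.toList.length
instance (seq1 : String) (seq2 : String) : Decidable (Pre_compare_two_sequences seq1 seq2) := by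
  unfold Pre_compare_two_sequences; infer_instance
def pvWitness_compare_two_sequences : String × String := ("ATGCatcc", "AAGCaTgc")
def Spec_compare_two_sequences (seq1 : String) (seq2 : String) (out : String) : Prop := out = compare_two_sequences_alt seq1 seq2
instance (seq1 : String) (seq2 : String) (out : String) : Decidable (Spec_compare_two_sequences seq1 seq2 out) := by unfold Spec_compare_two_sequences; infer_instance

-- ===== CLAIM (what is proved, stated in full; the proofs are below) =====
def Claim_equal_compare_two_sequences : Prop := ∀ (seq1 : String) (seq2 : String), Dom_compare_two_sequences seq1 seq2 → Pre_compare_two_sequences seq1 seq2 → Spec_compare_two_sequences seq1 seq2 (compare_two_sequences seq1 seq2)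

-- ===== LEMMAS AND PROOFS =====

-- A's loop, restated structurally on the zipped (already uppercased) pair list
def loopA (ps : List (Char × Char)) (st : Int × List Char) : Int × List Char :=
  ps.foldl
    (fun st p =>
      if p.1 = p.2 then (st.1 + 1, st.2)
      else if p.1 = 'N' then (st.1 + 1, st.2)
      else (0, st.2 ++ PySem.Int.toChars st.1 ++ [p.2]))
    st

-- B's mismatch list, restated structurally with an absolute start index k
def msOf (ps : List (Char × Char)) (k : Int) : List (Int × Char) :=
  match ps with
  | [] => []
  | p :: ps => if p.1 ≠ p.2 ∧ p.1 ≠ 'N' then (k, p.2) :: msOf ps (k + 1) else msOf ps (k + 1)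

def loopB (ms : List (Int × Char)) (st : Int × List (List Char)) : Int × List (List Char) :=
  ms.foldl (fun st ic => (ic.1, st.2 ++ [PySem.Int.toChars (ic.1 - st.1 - 1) ++ [ic.2]])) st

lemma msOf_eq_filterMap (ps : List (Char × Char)) : ∀ k : Int,
    (PySem.List.enumerate ps k).filterMap
      (fun p => if p.2.1 ≠ p.2.2 ∧ p.2.1 ≠ 'N' then some (p.1, p.2.2) else none)
    = msOf ps k := by
  induction ps with
  | nil => intro k; simp [PySem.List.enumerate_nil, msOf]
  | cons p ps ih =>
    intro k
    rw [PySem.List.enumerate_cons]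
    by_cases h : p.1 ≠ p.2 ∧ p.1 ≠ 'N' <;>
      simp [msOf, h, ih (k + 1)]

-- A's loop over range-with-indexing equals loopA over the zipped suffixes
lemma foldA_range (l1 l2 : List Char) (hlen : l2.length = l1.length) :
    ∀ (m k : Nat) (st : Int × List Char), l1.length = k + m →
    (PySem.List.pyRange (k : Int) (l1.length : Int) 1).foldl
      (fun (st : Int × List Char) i =>
        let c1 := PySem.List.pyGetD l1 i ' '
        let c2 := PySem.List.pyGetD l2 i ' '
        if c1 = c2 then (st.1 + 1, st.2)
        else if c1 = 'N' then (st.1 + 1, st.2)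
        else (0, st.2 ++ PySem.Int.toChars st.1 ++ [c2])) st
    = loopA ((l1.drop k).zip (l2.drop k)) st := by
  intro m
  induction m with
  | zero =>
    intro k st hk
    have h1 : (l1.drop k) = [] := by simp [List.drop_eq_nil_iff]; omega
    have h2 : (l2.drop k) = [] := by simp [List.drop_eq_nil_iff]; omega
    rw [PySem.List.pyRange_one_eq_nil (by omega)]
    simp [h1, h2, loopA]
  | succ m ih =>
    intro k st hk
    have hk1 : k < l1.length := by omega
    have hk2 : k < l2.length := by omega
    rw [PySem.List.pyRange_one_cons (by exact_mod_cast hk1)]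
    have d1 : l1.drop k = l1[k] :: l1.drop (k + 1) := (List.getElem_cons_drop hk1).symm
    have d2 : l2.drop k = l2[k] :: l2.drop (k + 1) := (List.getElem_cons_drop hk2).symm
    have g1 : PySem.List.pyGetD l1 (k : Int) ' ' = l1[k] := by
      rw [PySem.List.pyGetD_natCast]; exact List.getD_eq_getElem l1 ' ' hk1
    have g2 : PySem.List.pyGetD l2 (k : Int) ' ' = l2[k] := by
      rw [PySem.List.pyGetD_natCast]; exact List.getD_eq_getElem l2 ' ' hk2
    have hcast : (k : Int) + 1 = ((k + 1 : Nat) : Int) := by push_cast; ring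
    rw [List.foldl_cons, d1, d2, List.zip_cons_cons]
    simp only [g1, g2, hcast]
    rw [ih (k + 1) _ (by omega)]
    by_cases h : l1[k] = l2[k]
    · simp [loopA, h]
    · by_cases h2 : l1[k] = 'N' <;> simp [loopA, h, h2]

-- the main invariant: A's running counter is the gap since the previous mismatch index
lemma main (ps : List (Char × Char)) : ∀ (k prev : Int) (parts : List (List Char)),
    (loopA ps (k - prev - 1, parts.flatten)).2
      ++ PySem.Int.toChars (loopA ps (k - prev - 1, parts.flatten)).1 ++ ['M']
    = ((loopB (msOf ps k) (prev, parts)).2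
        ++ [PySem.Int.toChars ((k + ps.length) - (loopB (msOf ps k) (prev, parts)).1 - 1) ++ ['M']]).flatten := by
  induction ps with
  | nil => intro k prev parts; simp [loopA, msOf, loopB]
  | cons p ps ih =>
    intro k prev parts
    by_cases h : p.1 = p.2
    · have e : k - prev - 1 + 1 = (k + 1) - prev - 1 := by ring
      have e2 : (k + 1) + (ps.length : Int) = k + ((p :: ps).length : Int) := by
        simp; ring
      simp only [loopA, List.foldl_cons, if_pos h]
      rw [show (msOf (p :: ps) k) = msOf ps (k + 1) by simp [msOf, h]]
      have := ih (k + 1) prev parts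
      simp only [loopA, loopB] at this ⊢
      rw [e, this, e2]
    · by_cases h2 : p.1 = 'N'
      · have e : k - prev - 1 + 1 = (k + 1) - prev - 1 := by ring
        have e2 : (k + 1) + (ps.length : Int) = k + ((p :: ps).length : Int) := by
          simp; ring
        simp only [loopA, List.foldl_cons, if_neg h, if_pos h2]
        rw [show (msOf (p :: ps) k) = msOf ps (k + 1) by simp [msOf, h2]]
        have := ih (k + 1) prev parts
        simp only [loopA, loopB] at this ⊢
        rw [e, this, e2]
      · have hm : msOf (p :: ps) k = (k, p.2) :: msOf ps (k + 1) := by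
          simp [msOf, h, h2]
        have e2 : (k + 1) + (ps.length : Int) = k + ((p :: ps).length : Int) := by
          simp; ring
        have hfl : parts.flatten ++ PySem.Int.toChars (k - prev - 1) ++ [p.2]
            = (parts ++ [PySem.Int.toChars (k - prev - 1) ++ [p.2]]).flatten := by
          simp
        simp only [loopA, List.foldl_cons, if_neg h, if_neg h2, hm]
        have := ih (k + 1) k (parts ++ [PySem.Int.toChars (k - prev - 1) ++ [p.2]])
        rw [show (k + 1) - k - 1 = (0 : Int) by ring] at this
        simp only [loopA, loopB] at this ⊢
        rw [hfl, this, e2]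
        simp only [List.foldl_cons]

-- ===== VERDICT (by name: the statement is the Claim_ definition above) =====
theorem compare_two_sequences_spec : Claim_equal_compare_two_sequences := by
  intro seq1 seq2 _ hpre
  simp only [Spec_compare_two_sequences, compare_two_sequences, compare_two_sequences_alt]
  unfold Pre_compare_two_sequences at hpre
  have hlen : (PySem.Chars.upper seq2.toList).length = (PySem.Chars.upper seq1.toList).length := by
    simp [PySem.Chars.upper, hpre]
  have hA := foldA_range _ _ hlen (PySem.Chars.upper seq1.toList).length 0
    ((0 : Int), ([] : List Char)) (by omega)
  simp only [Nat.cast_zero, List.drop_zero] at hA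
  rw [hA, msOf_eq_filterMap]
  have := main ((PySem.Chars.upper seq1.toList).zip (PySem.Chars.upper seq2.toList)) 0 (-1) []
  simp only [List.flatten_nil] at this
  rw [show (0 : Int) - (-1) - 1 = 0 by ring] at this
  rw [this]
  have hz : (((PySem.Chars.upper seq1.toList).zip (PySem.Chars.upper seq2.toList)).length : Int)
      = ((PySem.Chars.upper seq1.toList).length : Int) := by
    simp [List.length_zip, hlen]
  rw [show ∀ x : Int, (0:Int) + x = x from fun x => by ring, hz]
  simp [loopB]
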